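-- pv_equiv track=rewrite | github.com/rwinklerwilkes/AoC2022 | day15.py | check_row_coverage
-- ===== SOURCE A (Python) =====
-- def check_row_coverage(row_number, points, radii):
--     intervals_covered = []
--     for point, radius in radii:
--         x, y = point
--         diff = abs(y-row_number)
--         remaining = radius - diff
--         if remaining >= 0:
--             intervals_covered.append((x-remaining,x+remaining))
--
--     x_covered = set.union(*[set(range(a,b+1)) for a,b in intervals_covered])
--     has_beacon = {point[1][0] for point in points if point[1][1] == row_number}
--     covered_points = x_covered - has_beacon
--     return covered_points
-- ===== SOURCE B (Python) =====
-- def check_row_coverage(row_number, points, radii):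
--     intervals = []
--     for (x, y), radius in radii:
--         remaining = radius - abs(y - row_number)
--         if remaining >= 0:
--             intervals.append((x - remaining, x + remaining))
--     # sort by start, then one sweep merging overlapping or adjacent intervals
--     intervals.sort(key=lambda iv: iv[0])
--     merged = []
--     for a, b in intervals:
--         if merged and a <= merged[-1][1] + 1:
--             if b > merged[-1][1]:
--                 merged[-1] = (merged[-1][0], b)
--         else:
--             merged.append((a, b))
--     has_beacon = {bx for (sx, sy), (bx, by) in points if by == row_number}
--     return {x for a, b in merged for x in range(a, b + 1) if x not in has_beacon}
-- ===== Notes on version B (the rewrite author's own statement) =====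
-- stated objective: alternative
-- what changed: Instead of materialising one set per sensor interval and folding set.union over all of them, B sorts the intervals by start and merges them in one sweep into disjoint ranges, enumerating each covered x exactly once (avoids re-enumerating overlapping ranges; speed not measured here).
import Mathlib
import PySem

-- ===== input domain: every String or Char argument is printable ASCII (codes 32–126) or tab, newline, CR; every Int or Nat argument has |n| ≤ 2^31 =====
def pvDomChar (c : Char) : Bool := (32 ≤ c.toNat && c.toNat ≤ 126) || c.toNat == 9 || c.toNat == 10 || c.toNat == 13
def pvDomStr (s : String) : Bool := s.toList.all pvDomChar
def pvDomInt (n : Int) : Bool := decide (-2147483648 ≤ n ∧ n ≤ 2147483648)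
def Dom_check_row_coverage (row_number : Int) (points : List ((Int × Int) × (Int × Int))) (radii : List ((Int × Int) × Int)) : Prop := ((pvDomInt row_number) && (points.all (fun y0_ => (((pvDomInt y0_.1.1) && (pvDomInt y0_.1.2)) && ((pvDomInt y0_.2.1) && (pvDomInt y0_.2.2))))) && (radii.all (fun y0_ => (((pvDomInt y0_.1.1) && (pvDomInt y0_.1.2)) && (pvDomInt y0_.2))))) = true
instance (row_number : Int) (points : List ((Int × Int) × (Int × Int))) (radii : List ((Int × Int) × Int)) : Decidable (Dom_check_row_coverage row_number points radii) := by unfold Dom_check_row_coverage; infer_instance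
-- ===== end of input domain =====

-- B replaces A's per-point "union of set(range(a,b+1))" materialisation by a sort-and-sweep that
-- merges the sensor intervals into disjoint ranges before enumerating points (objective: alternative).
-- Both Pythons return a SET (no defined iteration order); both ports return its elements in
-- ascending order — the canonical list representation of that set value.

-- ===== PORT A =====
def check_row_coverage (row_number : Int) (points : List ((Int × Int) × (Int × Int))) (radii : List ((Int × Int) × Int)) : List Int :=
  let intervals_covered : List (Int × Int) :=
    radii.foldl (fun acc pr =>
      let x := pr.1.1
      let y := pr.1.2
      let diff := |y - row_number|
      let remaining := pr.2 - diff
      if 0 ≤ remaining then acc ++ [(x - remaining, x + remaining)] else acc) []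
  match intervals_covered with
  | [] => []  -- Python: set.union(*[]) raises TypeError here; excluded by Pre_
  | iv0 :: rest =>
    let x_covered : PySem.Set Int :=
      rest.foldl (fun s iv => PySem.Set.union s (PySem.Set.ofList (PySem.List.pyRange iv.1 (iv.2 + 1) 1)))
        (PySem.Set.ofList (PySem.List.pyRange iv0.1 (iv0.2 + 1) 1))
    let has_beacon : PySem.Set Int :=
      PySem.Set.ofList ((points.filter (fun p => p.2.2 == row_number)).map (fun p => p.2.1))
    let covered_points : PySem.Set Int := PySem.Set.diff x_covered has_beacon
    PySem.List.sorted covered_points (fun x => x) false  -- ascending representation of the returned set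

-- ===== PORT B =====
-- one sweep step of Source B's merge loop: state = (finished merged intervals, current interval)
def pvSweepStep (st : List (Int × Int) × Option (Int × Int)) (iv : Int × Int) : List (Int × Int) × Option (Int × Int) :=
  match st.2 with
  | none => (st.1, some iv)
  | some c => if iv.1 ≤ c.2 + 1 then (st.1, some (c.1, max c.2 iv.2)) else (st.1 ++ [c], some iv)

def pvSweepFin (st : List (Int × Int) × Option (Int × Int)) : List (Int × Int) :=
  match st.2 with
  | none => st.1
  | some c => st.1 ++ [c]

def check_row_coverage_alt (row_number : Int) (points : List ((Int × Int) × (Int × Int))) (radii : List ((Int × Int) × Int)) : List Int :=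
  let intervals : List (Int × Int) :=
    radii.foldl (fun acc pr =>
      let x := pr.1.1
      let y := pr.1.2
      let remaining := pr.2 - |y - row_number|
      if 0 ≤ remaining then acc ++ [(x - remaining, x + remaining)] else acc) []
  let sortedIvs := PySem.List.sorted intervals (fun iv => iv.1) false
  let merged := pvSweepFin (sortedIvs.foldl pvSweepStep ([], none))
  let has_beacon : PySem.Set Int :=
    PySem.Set.ofList ((points.filter (fun p => p.2.2 == row_number)).map (fun p => p.2.1))
  let pts := (merged.flatMap (fun iv => PySem.List.pyRange iv.1 (iv.2 + 1) 1)).filter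
      (fun x => !(PySem.Set.contains has_beacon x))
  PySem.List.sorted (PySem.Set.ofList pts) (fun x => x) false  -- ascending representation of the returned set

-- ===== PRECONDITION & SPEC =====
-- Pre_ excludes exactly the inputs where no sensor reaches the row: there A's
-- set.union(*[]) raises TypeError (A returns on everything else).
def Pre_check_row_coverage (row_number : Int) (points : List ((Int × Int) × (Int × Int))) (radii : List ((Int × Int) × Int)) : Prop :=
  ∃ pr ∈ radii, |pr.1.2 - row_number| ≤ pr.2
instance (row_number : Int) (points : List ((Int × Int) × (Int × Int))) (radii : List ((Int × Int) × Int)) : Decidable (Pre_check_row_coverage row_number points radii) := by unfold Pre_check_row_coverage; infer_instance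

def pvWitness_check_row_coverage : Int × (List ((Int × Int) × (Int × Int))) × (List ((Int × Int) × Int)) :=
  (0, [((1, 0), (1, 0))], [((0, 0), 2)])

def Spec_check_row_coverage (row_number : Int) (points : List ((Int × Int) × (Int × Int))) (radii : List ((Int × Int) × Int)) (out : List Int) : Prop := out = check_row_coverage_alt row_number points radii
instance (row_number : Int) (points : List ((Int × Int) × (Int × Int))) (radii : List ((Int × Int) × Int)) (out : List Int) : Decidable (Spec_check_row_coverage row_number points radii out) := by unfold Spec_check_row_coverage; infer_instance

-- ===== CLAIM (what is proved, stated in full; the proofs are below) =====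
def Claim_equal_check_row_coverage : Prop := ∀ (row_number : Int) (points : List ((Int × Int) × (Int × Int))) (radii : List ((Int × Int) × Int)), Dom_check_row_coverage row_number points radii → Pre_check_row_coverage row_number points radii → Spec_check_row_coverage row_number points radii (check_row_coverage row_number points radii)
-- ===== LEMMAS AND PROOFS =====

-- a point x is covered by some interval of l
def pvCov (l : List (Int × Int)) (x : Int) : Prop := ∃ iv ∈ l, iv.1 ≤ x ∧ x ≤ iv.2

theorem pvCov_nil (x : Int) : pvCov [] x ↔ False := by simp [pvCov]

theorem pvCov_cons (iv : Int × Int) (l : List (Int × Int)) (x : Int) :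
    pvCov (iv :: l) x ↔ (iv.1 ≤ x ∧ x ≤ iv.2) ∨ pvCov l x := by
  unfold pvCov
  constructor
  · rintro ⟨q, hq, h⟩
    rcases List.mem_cons.1 hq with rfl | hq'
    · exact Or.inl h
    · exact Or.inr ⟨q, hq', h⟩
  · rintro (h | ⟨q, hq, h⟩)
    · exact ⟨iv, List.mem_cons_self, h⟩
    · exact ⟨q, List.mem_cons_of_mem _ hq, h⟩

theorem pvCov_append (l₁ l₂ : List (Int × Int)) (x : Int) :
    pvCov (l₁ ++ l₂) x ↔ pvCov l₁ x ∨ pvCov l₂ x := by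
  unfold pvCov
  constructor
  · rintro ⟨q, hq, h⟩
    rcases List.mem_append.1 hq with hq' | hq'
    · exact Or.inl ⟨q, hq', h⟩
    · exact Or.inr ⟨q, hq', h⟩
  · rintro (⟨q, hq, h⟩ | ⟨q, hq, h⟩)
    · exact ⟨q, List.mem_append_left _ hq, h⟩
    · exact ⟨q, List.mem_append_right _ hq, h⟩

theorem pvCov_singleton (iv : Int × Int) (x : Int) :
    pvCov [iv] x ↔ (iv.1 ≤ x ∧ x ≤ iv.2) := by
  rw [pvCov_cons, pvCov_nil]; tauto

-- pvCov only depends on the members of the list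
theorem pvCov_congr (l l' : List (Int × Int)) (h : ∀ iv, iv ∈ l ↔ iv ∈ l') (x : Int) :
    pvCov l x ↔ pvCov l' x := by
  unfold pvCov
  constructor
  · rintro ⟨q, hq, hx⟩; exact ⟨q, (h q).1 hq, hx⟩
  · rintro ⟨q, hq, hx⟩; exact ⟨q, (h q).2 hq, hx⟩

theorem pv_mem_flatMap_ranges (l : List (Int × Int)) (x : Int) :
    x ∈ l.flatMap (fun iv => PySem.List.pyRange iv.1 (iv.2 + 1) 1) ↔ pvCov l x := by
  simp only [List.mem_flatMap, PySem.List.mem_pyRange_one, pvCov]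
  constructor
  · rintro ⟨q, hq, h1, h2⟩; exact ⟨q, hq, h1, by omega⟩
  · rintro ⟨q, hq, h1, h2⟩; exact ⟨q, hq, h1, by omega⟩

theorem pv_mem_union_foldl (l : List (Int × Int)) (s : PySem.Set Int) (x : Int) :
    x ∈ l.foldl (fun s iv => PySem.Set.union s (PySem.Set.ofList (PySem.List.pyRange iv.1 (iv.2 + 1) 1))) s ↔
      x ∈ s ∨ pvCov l x := by
  induction l generalizing s with
  | nil => simp [pvCov]
  | cons iv t ih =>
    simp only [List.foldl_cons, ih, PySem.Set.mem_union, PySem.Set.mem_ofList,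
      PySem.List.mem_pyRange_one, pvCov_cons]
    have : (iv.1 ≤ x ∧ x < iv.2 + 1) ↔ (iv.1 ≤ x ∧ x ≤ iv.2) := by omega
    tauto

theorem pv_nodup_union_foldl (l : List (Int × Int)) (s : PySem.Set Int) (hs : s.Nodup) :
    (l.foldl (fun s iv => PySem.Set.union s (PySem.Set.ofList (PySem.List.pyRange iv.1 (iv.2 + 1) 1))) s).Nodup := by
  induction l generalizing s with
  | nil => exact hs
  | cons iv t ih => exact ih _ (PySem.Set.nodup_union _ _ hs)

-- coverage of the sweep, running state (m, some c)
theorem pv_sweep_cov (l : List (Int × Int)) (m : List (Int × Int)) (c : Int × Int) (x : Int)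
    (hlo : ∀ iv ∈ l, c.1 ≤ iv.1) (hsort : l.Pairwise (fun p q => p.1 ≤ q.1)) :
    pvCov (pvSweepFin (l.foldl pvSweepStep (m, some c))) x ↔
      pvCov m x ∨ (c.1 ≤ x ∧ x ≤ c.2) ∨ pvCov l x := by
  induction l generalizing m c with
  | nil =>
    simp only [List.foldl_nil, pvSweepFin, pvCov_append, pvCov_singleton, pvCov_nil]
    tauto
  | cons iv t ih =>
    rcases List.pairwise_cons.1 hsort with ⟨hhd, htl⟩
    simp only [List.foldl_cons, pvSweepStep]
    by_cases hle : iv.1 ≤ c.2 + 1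
    · simp only [hle, if_pos]
      rw [ih m (c.1, max c.2 iv.2)
        (fun q hq => le_trans (hlo iv List.mem_cons_self) (hhd q hq)) htl]
      have harith : (c.1 ≤ x ∧ x ≤ max c.2 iv.2) ↔ (c.1 ≤ x ∧ x ≤ c.2) ∨ (iv.1 ≤ x ∧ x ≤ iv.2) := by
        have := hlo iv List.mem_cons_self
        rcases le_total c.2 iv.2 with h | h <;>
          simp only [max_eq_right h, max_eq_left h] <;> omega
      rw [pvCov_cons]
      simp only [harith]
      tauto
    · simp only [hle, if_false]
      rw [ih (m ++ [c]) iv hhd htl, pvCov_append, pvCov_singleton, pvCov_cons]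
      tauto

theorem pv_sweep_cov_top (l : List (Int × Int)) (x : Int)
    (hsort : l.Pairwise (fun p q => p.1 ≤ q.1)) :
    pvCov (pvSweepFin (l.foldl pvSweepStep ([], none))) x ↔ pvCov l x := by
  cases l with
  | nil => simp [pvSweepFin, pvCov]
  | cons iv t =>
    rcases List.pairwise_cons.1 hsort with ⟨hhd, htl⟩
    simp only [List.foldl_cons, pvSweepStep]
    rw [pv_sweep_cov t [] iv x hhd htl, pvCov_nil, pvCov_cons]
    tauto

-- two nodup lists with the same members have the same ascending representation
theorem pv_sorted_eq_of_mem_iff (s t : List Int) (hs : s.Nodup) (ht : t.Nodup)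
    (h : ∀ x, x ∈ s ↔ x ∈ t) :
    PySem.List.sorted s (fun x => x) false = PySem.List.sorted t (fun x => x) false := by
  have hperm : s.Perm t := (List.perm_ext_iff_of_nodup hs ht).2 h
  have hpt : (PySem.List.sorted t (fun x => x) false).Perm t := PySem.List.sorted_perm t _ _
  have hpw_le : (PySem.List.sorted t (fun x => x) false).Pairwise (fun a b => a ≤ b) :=
    PySem.List.sorted_pairwise t _
  have hnd : (PySem.List.sorted t (fun x => x) false).Nodup := hpt.nodup_iff.2 ht
  have hpw : (PySem.List.sorted t (fun x => x) false).Pairwise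
      (fun a b => (fun x : Int => x) a < (fun x : Int => x) b) :=
    (List.Pairwise.and hpw_le hnd).imp (fun h => lt_of_le_of_ne h.1 h.2)
  exact PySem.List.sorted_eq_of_perm_of_pairwise_lt s _ (fun x => x) (hpt.trans hperm.symm) hpw

-- ===== VERDICT (by name: the statement is the Claim_ definition above) =====
theorem check_row_coverage_spec : Claim_equal_check_row_coverage := by
  intro row points radii _ hpre
  unfold Spec_check_row_coverage check_row_coverage check_row_coverage_alt
  obtain ⟨pr0, hpr0, hcond⟩ := hpre
  set L : List (Int × Int) := radii.foldl (fun acc pr =>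
      if 0 ≤ pr.2 - |pr.1.2 - row| then
        acc ++ [(pr.1.1 - (pr.2 - |pr.1.2 - row|), pr.1.1 + (pr.2 - |pr.1.2 - row|))]
      else acc) [] with hLdef
  have hLeq : L = (radii.filter (fun pr => decide (0 ≤ pr.2 - |pr.1.2 - row|))).map
      (fun pr => (pr.1.1 - (pr.2 - |pr.1.2 - row|), pr.1.1 + (pr.2 - |pr.1.2 - row|))) := by
    rw [hLdef]
    have := PySem.List.foldl_append_if (fun pr : (Int × Int) × Int => decide (0 ≤ pr.2 - |pr.1.2 - row|))
      (fun pr => (pr.1.1 - (pr.2 - |pr.1.2 - row|), pr.1.1 + (pr.2 - |pr.1.2 - row|))) radii []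
    simpa using this
  have hne : L ≠ [] := by
    rw [hLeq]
    intro h
    rw [List.map_eq_nil_iff, List.filter_eq_nil_iff] at h
    exact absurd hcond (by simpa using h pr0 hpr0)
  obtain ⟨iv0, rest, hL⟩ := List.exists_cons_of_ne_nil hne
  rw [hL]
  apply pv_sorted_eq_of_mem_iff
  · exact PySem.Set.nodup_diff _ _ (pv_nodup_union_foldl _ _ (PySem.Set.nodup_ofList _))
  · exact PySem.Set.nodup_ofList _
  · intro x
    rw [PySem.Set.mem_diff, pv_mem_union_foldl]
    simp only [PySem.Set.mem_ofList, List.mem_filter, pv_mem_flatMap_ranges]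
    rw [pv_sweep_cov_top _ _ (PySem.List.sorted_pairwise (iv0 :: rest) (fun iv => iv.1)),
      pvCov_congr _ (iv0 :: rest)
        (fun iv => PySem.List.mem_sorted (iv0 :: rest) (fun q => q.1) false iv),
      pvCov_cons]
    have hrng : (x ∈ PySem.List.pyRange iv0.1 (iv0.2 + 1) 1) ↔ (iv0.1 ≤ x ∧ x ≤ iv0.2) := by
      rw [PySem.List.mem_pyRange_one]; omega
    rw [hrng]
    simp [PySem.Set.mem_ofList, List.contains_eq_mem]
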